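-- pv_equiv track=rewrite | github.com/niv252/SummHelper | server-api/src/utils/parser.py | get_splitted_spans
-- ===== SOURCE A (Python) =====
-- def check_intersection(sentence, span):
--     if (sentence[0] >= span[0] and sentence[1] >= span[1] and span[1] >= sentence[0] and span[0] <= sentence[1]) or \
--        (sentence[0] <= span[0] and span[1] >= sentence[1] and span[0] <= sentence[1] and span[1] >= sentence[0]) or \
--        (span[0] <= sentence[0] and span[1] >= sentence[1]):
--         return True
--     else:
--         return False
--
-- def split_span(sentences_indexes, span):
--     new_spans = []
--
--     relevant_sentences = []
--     for sentence in sentences_indexes: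
--         if(check_intersection(sentence, span)):
--             relevant_sentences.append(sentence)
--     if(len(relevant_sentences) <= 1):
--         return span, False
--     result = [[span[0], relevant_sentences[0][1]]]
--     for sentence in relevant_sentences[1:-1]:
--         result.append(sentence)
--     result.append([relevant_sentences[len(relevant_sentences) - 1][0], span[1]])
--     return result, True
--
-- def get_splitted_spans(sentences_indexes, spans):
--     results = []
--     for span in spans:
--         temp, should_flat = split_span(sentences_indexes, span)
--         if should_flat:
--             for t in temp:
--                 results.append(t)
--         else:
--             results.append(temp)
--     final_results = []
--     for i, result in enumerate(results):
--         final_results.append([result[0], result[1]])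
--     return final_results
-- ===== SOURCE B (Python) =====
-- def _covers(sentence, span):
--     a, b = sentence[0], sentence[1]
--     c, d = span[0], span[1]
--     return (c <= a and d >= b) or (c <= b and d >= a and (a >= c or b <= d))
--
-- def get_splitted_spans(sentences_indexes, spans):
--     out = []
--     for sp in spans:
--         c, d = sp[0], sp[1]
--         first_end = None
--         mids = []
--         last = None
--         for s in sentences_indexes:
--             if _covers(s, sp):
--                 if first_end is None:
--                     first_end = s[1]
--                 elif last is None:
--                     last = s
--                 else:
--                     mids.append([last[0], last[1]])
--                     last = s
--         if last is None:
--             out.append([c, d])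
--         else:
--             out.append([c, first_end])
--             out.extend(mids)
--             out.append([last[0], d])
--     return out
-- ===== Notes on version B (the rewrite author's own statement) =====
-- stated objective: alternative
-- what changed: Per span, A filters the sentence list into an intermediate 'relevant' list and reassembles pieces with slicing/indexing ([0], [1:-1], [len-1]) plus a final projection pass; B makes a single accumulating pass over the sentences per span with a state machine (first end, middle pieces, last sentence) and a simplified equivalent intersection test, emitting the final pairs directly.
import Mathlib
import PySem

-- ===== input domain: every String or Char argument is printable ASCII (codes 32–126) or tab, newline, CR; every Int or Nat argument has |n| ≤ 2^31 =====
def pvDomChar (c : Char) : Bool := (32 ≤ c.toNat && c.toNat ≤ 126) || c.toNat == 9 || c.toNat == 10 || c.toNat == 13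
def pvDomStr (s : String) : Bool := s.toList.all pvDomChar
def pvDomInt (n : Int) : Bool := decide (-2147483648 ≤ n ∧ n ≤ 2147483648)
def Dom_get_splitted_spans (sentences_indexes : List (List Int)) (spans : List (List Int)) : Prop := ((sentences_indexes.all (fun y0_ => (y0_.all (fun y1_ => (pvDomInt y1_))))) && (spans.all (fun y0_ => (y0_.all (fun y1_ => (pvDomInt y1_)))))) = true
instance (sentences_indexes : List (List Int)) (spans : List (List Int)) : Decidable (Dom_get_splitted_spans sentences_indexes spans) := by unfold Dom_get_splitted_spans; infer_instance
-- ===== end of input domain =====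

-- B replaces A's per-span filter + slice reassembly by one accumulating pass over the
-- sentences with a simplified intersection test (objective: alternative, same asymptotic cost).
-- Equivalence is about return values; neither program mutates its arguments.

-- ===== PORT A =====
-- shared element access: xs[i] where Python would raise is outside Pre_, .getD 0 is never hit there
def pvGetI (xs : List Int) (i : Int) : Int := (PySem.List.pyGet? xs i).getD 0
def pvGetL (xss : List (List Int)) (i : Int) : List Int := (PySem.List.pyGet? xss i).getD []

def check_intersection (sentence span : List Int) : Bool :=
  (decide (pvGetI sentence 0 ≥ pvGetI span 0) && decide (pvGetI sentence 1 ≥ pvGetI span 1) &&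
   decide (pvGetI span 1 ≥ pvGetI sentence 0) && decide (pvGetI span 0 ≤ pvGetI sentence 1)) ||
  (decide (pvGetI sentence 0 ≤ pvGetI span 0) && decide (pvGetI span 1 ≥ pvGetI sentence 1) &&
   decide (pvGetI span 0 ≤ pvGetI sentence 1) && decide (pvGetI span 1 ≥ pvGetI sentence 0)) ||
  (decide (pvGetI span 0 ≤ pvGetI sentence 0) && decide (pvGetI span 1 ≥ pvGetI sentence 1))

-- Python returns either the bare span (False) or a list of spans (True): modelled as a sum
def split_span (sentences_indexes : List (List Int)) (span : List Int) :
    (List (List Int) ⊕ List Int) × Bool :=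
  let relevant := sentences_indexes.foldl
    (fun acc sentence => if check_intersection sentence span then acc ++ [sentence] else acc) []
  if relevant.length ≤ 1 then (Sum.inr span, false)
  else
    let result := [[pvGetI span 0, pvGetI (pvGetL relevant 0) 1]]
    let result := (PySem.List.slice relevant (some 1) (some (-1))).foldl (fun r s => r ++ [s]) result
    let result := result ++ [[pvGetI (pvGetL relevant ((relevant.length : Int) - 1)) 0, pvGetI span 1]]
    (Sum.inl result, true)

def get_splitted_spans (sentences_indexes : List (List Int)) (spans : List (List Int)) : List (List Int) :=
  let results := spans.foldl (fun results span =>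
    match split_span sentences_indexes span with
    | (Sum.inl temp, _) => temp.foldl (fun r t => r ++ [t]) results
    | (Sum.inr temp, _) => results ++ [temp]) []
  results.foldl (fun fr result => fr ++ [[pvGetI result 0, pvGetI result 1]]) []

-- ===== PORT B =====
def pvCovers (sentence span : List Int) : Bool :=
  let a := pvGetI sentence 0
  let b := pvGetI sentence 1
  let c := pvGetI span 0
  let d := pvGetI span 1
  (decide (c ≤ a) && decide (d ≥ b)) ||
  (decide (c ≤ b) && decide (d ≥ a) && (decide (a ≥ c) || decide (b ≤ d)))

-- state of B's inner loop: (first_end, mids, last)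
def altStep (span : List Int) (st : Option Int × List (List Int) × Option (List Int))
    (s : List Int) : Option Int × List (List Int) × Option (List Int) :=
  if pvCovers s span then
    match st with
    | (none, mids, last) => (some (pvGetI s 1), mids, last)
    | (some fb, mids, none) => (some fb, mids, some s)
    | (some fb, mids, some l) => (some fb, mids ++ [[pvGetI l 0, pvGetI l 1]], some s)
  else st

def get_splitted_spans_alt (sentences_indexes : List (List Int)) (spans : List (List Int)) : List (List Int) :=
  spans.foldl (fun out sp =>
    let c := pvGetI sp 0
    let d := pvGetI sp 1
    match sentences_indexes.foldl (altStep sp) (none, [], none) with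
    | (_, _, none) => out ++ [[c, d]]
    | (some fb, mids, some l) => out ++ [[c, fb]] ++ mids ++ [[pvGetI l 0, d]]
    | (none, _, some _) => out ++ [[c, d]]  -- state never reached: last is only set after first_end
    ) []

-- ===== PRECONDITION & SPEC =====
-- Pre_ excludes exactly the inputs where Python A raises IndexError: a span row of length < 2,
-- or (when at least one span exists, so sentences are inspected) a sentence row of length < 2.
def Pre_get_splitted_spans (sentences_indexes : List (List Int)) (spans : List (List Int)) : Prop :=
  (∀ sp ∈ spans, 2 ≤ sp.length) ∧ (spans ≠ [] → ∀ s ∈ sentences_indexes, 2 ≤ s.length)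
instance (sentences_indexes : List (List Int)) (spans : List (List Int)) : Decidable (Pre_get_splitted_spans sentences_indexes spans) := by unfold Pre_get_splitted_spans; infer_instance

def pvWitness_get_splitted_spans : List (List Int) × List (List Int) :=
  ([[0, 3], [4, 7], [8, 11]], [[1, 6], [9, 10]])

def Spec_get_splitted_spans (sentences_indexes : List (List Int)) (spans : List (List Int)) (out : List (List Int)) : Prop := out = get_splitted_spans_alt sentences_indexes spans
instance (sentences_indexes : List (List Int)) (spans : List (List Int)) (out : List (List Int)) : Decidable (Spec_get_splitted_spans sentences_indexes spans out) := by unfold Spec_get_splitted_spans; infer_instance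

-- ===== CLAIM (what is proved, stated in full; the proofs are below) =====
def Claim_equal_get_splitted_spans : Prop := ∀ (sentences_indexes : List (List Int)) (spans : List (List Int)), Dom_get_splitted_spans sentences_indexes spans → Pre_get_splitted_spans sentences_indexes spans → Spec_get_splitted_spans sentences_indexes spans (get_splitted_spans sentences_indexes spans)

-- ===== LEMMAS AND PROOFS =====

theorem flatten_map_singleton (l : List (List Int)) (f : List Int → List Int) :
    (l.map (fun x => [f x])).flatten = l.map f := by
  induction l with
  | nil => rfl
  | cons x xs ih => simp [ih]

theorem getLastD_eq_getLast?_getD (xs : List (List Int)) (d : List Int) :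
    xs.getLastD d = xs.getLast?.getD d := by
  cases xs <;> simp

-- the two intersection tests agree
theorem check_eq_covers (s p : List Int) : check_intersection s p = pvCovers s p := by
  unfold check_intersection pvCovers
  generalize pvGetI s 0 = a
  generalize pvGetI s 1 = b
  generalize pvGetI p 0 = c
  generalize pvGetI p 1 = d
  rw [Bool.eq_iff_iff]
  simp only [Bool.or_eq_true, Bool.and_eq_true, decide_eq_true_eq]
  omega

theorem pvGetI_pair_zero (x y : Int) : pvGetI [x, y] 0 = x := by
  simp [pvGetI]

theorem pvGetI_pair_one (x y : Int) : pvGetI [x, y] 1 = y := by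
  simp [pvGetI]

-- A's relevant-sentence accumulation is a filter
theorem foldl_filter_append (p : List Int → Bool) (xs : List (List Int)) :
    ∀ acc, xs.foldl (fun acc s => if p s then acc ++ [s] else acc) acc = acc ++ xs.filter p := by
  induction xs with
  | nil => intro acc; simp
  | cons x xs ih =>
    intro acc
    by_cases h : p x <;> simp [List.foldl_cons, h, ih]

-- B's inner loop ignores non-intersecting sentences
theorem foldl_altStep_filter (sp : List Int) (xs : List (List Int)) :
    ∀ st, xs.foldl (altStep sp) st = (xs.filter (fun s => pvCovers s sp)).foldl (altStep sp) st := by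
  induction xs with
  | nil => intro st; simp
  | cons x xs ih =>
    intro st
    by_cases h : pvCovers x sp <;> simp [List.foldl_cons, h, ih, altStep]

-- B's inner loop on the intersecting sentences, from a fully-started state
theorem foldl_altStep_run (sp : List Int) (rs : List (List Int))
    (h : ∀ s ∈ rs, pvCovers s sp = true) :
    ∀ (fb : Int) (mids : List (List Int)) (l : List Int),
      rs.foldl (altStep sp) (some fb, mids, some l) =
        (some fb, mids ++ ((l :: rs).dropLast.map (fun m => [pvGetI m 0, pvGetI m 1])),
         some (rs.getLastD l)) := by
  induction rs with
  | nil => intro fb mids l; simp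
  | cons r rs ih =>
    intro fb mids l
    have hr : pvCovers r sp = true := h r (by simp)
    have hrs : ∀ s ∈ rs, pvCovers s sp = true := fun s hs => h s (by simp [hs])
    simp only [List.foldl_cons, altStep, hr, if_pos]
    rw [ih hrs]
    simp [List.dropLast_cons₂]
    rw [← getLastD_eq_getLast?_getD, ← getLastD_eq_getLast?_getD, List.getLastD_cons]

-- per-span equality: A's pieces, mapped by the final [r[0], r[1]] projection, are B's pieces
theorem per_span (si : List (List Int)) (sp : List Int) :
    (match split_span si sp with
     | (Sum.inl temp, _) => temp
     | (Sum.inr temp, _) => [temp]).map (fun r => [pvGetI r 0, pvGetI r 1]) =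
    (match si.foldl (altStep sp) (none, [], none) with
     | (_, _, none) => [[pvGetI sp 0, pvGetI sp 1]]
     | (some fb, mids, some l) => [[pvGetI sp 0, fb]] ++ mids ++ [[pvGetI l 0, pvGetI sp 1]]
     | (none, _, some _) => [[pvGetI sp 0, pvGetI sp 1]]) := by
  have hfilter : si.foldl (fun acc s => if check_intersection s sp then acc ++ [s] else acc) [] =
      si.filter (fun s => pvCovers s sp) := by
    rw [show (fun (acc : List (List Int)) s => if check_intersection s sp then acc ++ [s] else acc)
        = (fun acc s => if pvCovers s sp then acc ++ [s] else acc) from by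
      funext acc s; rw [check_eq_covers]]
    simpa using foldl_filter_append (fun s => pvCovers s sp) si []
  rw [foldl_altStep_filter]
  rcases hR : si.filter (fun s => pvCovers s sp) with _ | ⟨r0, rs⟩
  · -- no intersecting sentence
    simp [split_span, hfilter, hR]
  · have hr0 : pvCovers r0 sp = true := by
      have hmem0 : r0 ∈ si.filter (fun s => pvCovers s sp) := by
        rw [hR]; exact List.mem_cons_self ..
      exact (List.mem_filter.mp hmem0).2
    rcases rs with _ | ⟨r1, rs'⟩
    · -- exactly one intersecting sentence
      simp [split_span, hfilter, hR, List.foldl_cons, altStep, hr0]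
    · -- at least two: the span is split
      have hmem : ∀ s ∈ r1 :: rs', pvCovers s sp = true := by
        intro s hs
        have hmem0 : s ∈ si.filter (fun s => pvCovers s sp) := by
          rw [hR]; exact List.mem_cons_of_mem r0 hs
        exact (List.mem_filter.mp hmem0).2
      have hr1 : pvCovers r1 sp = true := hmem r1 (by simp)
      have hrs' : ∀ s ∈ rs', pvCovers s sp = true := fun s hs => hmem s (by simp [hs])
      simp only [List.foldl_cons, altStep, hr0, hr1, if_pos]
      rw [foldl_altStep_run sp rs' hrs']
      have hslice : PySem.List.slice (r0 :: r1 :: rs') (some 1) (some (-1))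
          = (r1 :: rs').dropLast := by
        have : ∀ (xs : List (List Int)), PySem.List.slice xs (some 1) (some (-1)) = xs.tail.dropLast := by
          intro xs
          simp [PySem.List.slice, PySem.List.clampIdx]
          rcases xs with _ | ⟨x, xs⟩
          · simp
          · simp [List.dropLast_eq_take]
        simpa using this (r0 :: r1 :: rs')
      have hlast : pvGetL (r0 :: r1 :: rs') ((((r0 :: r1 :: rs').length : Nat) : Int) - 1)
          = (rs'.getLastD r1) := by
        have h1 : ((((r0 :: r1 :: rs').length : Nat) : Int) - 1)
            = (((r0 :: r1 :: rs').length - 1 : Nat) : Int) := by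
          simp only [List.length_cons]; push_cast; omega
        rw [pvGetL, h1, PySem.List.pyGet?_natCast]
        rw [← List.getLast?_eq_getElem?, ← getLastD_eq_getLast?_getD,
          List.getLastD_cons, List.getLastD_cons]
      simp only [split_span, hfilter, hR]
      have hlen : ¬ ((r0 :: r1 :: rs').length ≤ 1) := by simp
      simp only [hlen, if_false]
      have hget0 : pvGetL (r0 :: r1 :: rs') 0 = r0 := by
        simp [pvGetL, PySem.List.pyGet?_zero]
      simp only [hslice, hget0, hlast]
      rw [show ∀ (init : List (List Int)) (xs : List (List Int)),
            xs.foldl (fun r s => r ++ [s]) init = init ++ xs from by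
        intro init xs
        induction xs generalizing init with
        | nil => simp
        | cons x xs ih => simp [List.foldl_cons, ih]]
      simp [List.map_append, pvGetI_pair_zero, pvGetI_pair_one]

-- ===== VERDICT (by name: the statement is the Claim_ definition above) =====
theorem get_splitted_spans_spec : Claim_equal_get_splitted_spans := by
  intro si spans _hdom hpre
  unfold Spec_get_splitted_spans
  rcases hspans : spans with _ | ⟨sp0, sps⟩
  · simp [get_splitted_spans, get_splitted_spans_alt]
  have hsi : ∀ s ∈ si, 2 ≤ s.length := hpre.2 (by simp [hspans])
  have hsp : ∀ sp ∈ spans, 2 ≤ sp.length := hspans ▸ hpre.1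
  rw [← hspans]
  clear hspans
  unfold get_splitted_spans get_splitted_spans_alt
  -- fold the final projection into the span loop
  have key : ∀ (ss : List (List Int)), (∀ sp ∈ ss, 2 ≤ sp.length) →
      ∀ (accA : List (List Int)),
      (ss.foldl (fun out sp =>
        match si.foldl (altStep sp) (none, [], none) with
        | (_, _, none) => out ++ [[pvGetI sp 0, pvGetI sp 1]]
        | (some fb, mids, some l) => out ++ [[pvGetI sp 0, fb]] ++ mids ++ [[pvGetI l 0, pvGetI sp 1]]
        | (none, _, some _) => out ++ [[pvGetI sp 0, pvGetI sp 1]])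
        (accA.map (fun r => [pvGetI r 0, pvGetI r 1]))) =
      (ss.foldl (fun results span =>
        match split_span si span with
        | (Sum.inl temp, _) => temp.foldl (fun r t => r ++ [t]) results
        | (Sum.inr temp, _) => results ++ [temp]) accA).map (fun r => [pvGetI r 0, pvGetI r 1]) := by
    intro ss
    induction ss with
    | nil => intro _ accA; simp
    | cons sp ss ih =>
      intro hss accA
      have hsp0 : 2 ≤ sp.length := hss sp (by simp)
      have hss' : ∀ q ∈ ss, 2 ≤ q.length := fun q hq => hss q (by simp [hq])
      simp only [List.foldl_cons]
      have step : (match si.foldl (altStep sp) (none, [], none) with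
        | (_, _, none) => (accA.map (fun r => [pvGetI r 0, pvGetI r 1])) ++ [[pvGetI sp 0, pvGetI sp 1]]
        | (some fb, mids, some l) => (accA.map (fun r => [pvGetI r 0, pvGetI r 1])) ++ [[pvGetI sp 0, fb]] ++ mids ++ [[pvGetI l 0, pvGetI sp 1]]
        | (none, _, some _) => (accA.map (fun r => [pvGetI r 0, pvGetI r 1])) ++ [[pvGetI sp 0, pvGetI sp 1]]) =
        (match split_span si sp with
        | (Sum.inl temp, _) => temp.foldl (fun r t => r ++ [t]) accA
        | (Sum.inr temp, _) => accA ++ [temp]).map (fun r => [pvGetI r 0, pvGetI r 1]) := by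
        have hps := per_span si sp
        have hfoldapp : ∀ (init xs : List (List Int)),
            xs.foldl (fun r t => r ++ [t]) init = init ++ xs := by
          intro init xs
          induction xs generalizing init with
          | nil => simp
          | cons x xs ih2 => simp [List.foldl_cons, ih2]
        rcases h : si.foldl (altStep sp) (none, [], none) with ⟨fb?, mids, l?⟩
        rcases hsplit : split_span si sp with ⟨temp, flag⟩
        rw [hsplit, h] at hps
        rcases temp with temp | temp <;>
          rcases fb? with _ | fb <;> rcases l? with _ | l <;>
          simp only [List.map_append, List.map_cons, List.map_nil] at hps ⊢ <;>
          first
          | (rw [hfoldapp]; simp [hps, List.append_assoc])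
          | simp [hps, List.append_assoc]
      rw [step, ih hss']
  simpa [flatten_map_singleton] using (key spans hsp []).symm
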